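-- pv_equiv track=rewrite | github.com/magnus-lindstrom/adventofcode | 2017/src/utils.py | reverse_list_section
-- ===== SOURCE A (Python) =====
-- import math
--
-- def reverse_list_section(listt, section_size, current_pos):
--     list_size = len(listt)
--     for i in range(math.ceil(section_size / 2)):
--         tmp = listt[(current_pos + i) % list_size]
--         listt[(current_pos + i) % list_size] = listt[
--             (current_pos + section_size - i - 1) % list_size
--         ]
--
--         listt[(current_pos + section_size - i - 1) % list_size] = tmp
--     return listt
-- ===== SOURCE B (Python) =====
-- def reverse_list_section(listt, section_size, current_pos):
--     n = len(listt)
--     idx = [(current_pos + i) % n for i in range(section_size)]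
--     vals = [listt[j] for j in idx]
--     for j, v in zip(idx, reversed(vals)):
--         listt[j] = v
--     return listt
-- ===== Notes on version B (the rewrite author's own statement) =====
-- stated objective: alternative
-- what changed: Replaced the inward pairwise-swap loop over ceil(n/2) iterations with a gather/reverse/scatter decomposition: compute the circular index list, read the section, and write it back reversed.
-- outside the precondition, e.g. on reverse_list_section([1, 2, 3], 5, 1): A returns [1, 2, 3], B returns [1, 3, 2]
import Mathlib
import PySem

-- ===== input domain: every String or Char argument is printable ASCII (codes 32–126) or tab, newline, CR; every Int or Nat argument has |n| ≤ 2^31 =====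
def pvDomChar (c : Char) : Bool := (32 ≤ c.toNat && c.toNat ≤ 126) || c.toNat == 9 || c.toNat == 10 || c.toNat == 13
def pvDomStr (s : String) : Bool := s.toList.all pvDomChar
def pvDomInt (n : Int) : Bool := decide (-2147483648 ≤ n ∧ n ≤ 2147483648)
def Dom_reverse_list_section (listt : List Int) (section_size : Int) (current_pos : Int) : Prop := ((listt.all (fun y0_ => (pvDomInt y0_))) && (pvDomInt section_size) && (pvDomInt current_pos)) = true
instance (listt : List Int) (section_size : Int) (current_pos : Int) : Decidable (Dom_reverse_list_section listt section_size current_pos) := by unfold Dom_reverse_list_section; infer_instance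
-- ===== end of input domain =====

-- B replaces A's inward pairwise-swap loop by a gather/reverse/scatter decomposition (same cost);
-- in Python both mutate listt in place to the same final state, and the claim is about the returned list.


-- ===== PORT A =====
-- math.ceil(section_size / 2) on ints with |section_size| ≤ 2^31 equals (section_size + 1) // 2
-- (float division is exact at this magnitude); both indices are '% list_size' results, hence in
-- range whenever list_size > 0, so pyGetD/pySetD are exact there (list_size = 0 with a loop
-- iteration is Python's ZeroDivisionError, excluded by Pre_).
def reverse_list_section (listt : List Int) (section_size : Int) (current_pos : Int) : List Int :=
  let listSize : Int := (listt.length : Int)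
  (PySem.List.pyRange 0 (PySem.Int.floordiv (section_size + 1) 2) 1).foldl
    (fun l i =>
      let tmp := PySem.List.pyGetD l (PySem.Int.mod (current_pos + i) listSize) 0
      let l2 := PySem.List.pySetD l (PySem.Int.mod (current_pos + i) listSize)
                  (PySem.List.pyGetD l (PySem.Int.mod (current_pos + section_size - i - 1) listSize) 0)
      PySem.List.pySetD l2 (PySem.Int.mod (current_pos + section_size - i - 1) listSize) tmp)
    listt

-- ===== PORT B =====
def reverse_list_section_alt (listt : List Int) (section_size : Int) (current_pos : Int) : List Int :=
  let n : Int := (listt.length : Int)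
  let idx := (PySem.List.pyRange 0 section_size 1).map (fun i => PySem.Int.mod (current_pos + i) n)
  let vals := idx.map (fun j => PySem.List.pyGetD listt j 0)
  (idx.zip vals.reverse).foldl (fun l jv => PySem.List.pySetD l jv.1 jv.2) listt

-- ===== PRECONDITION & SPEC =====
-- Pre_ excludes (i) an empty list with section_size ≥ 1, where A raises ZeroDivisionError, and
-- (ii) section_size > len(listt), where the circular indices collide and A's in-place pairwise
-- swaps versus B's last-write-wins scatter are two equally accidental resolutions of the overlap.
def Pre_reverse_list_section (listt : List Int) (section_size : Int) (current_pos : Int) : Prop :=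
  section_size ≤ (listt.length : Int)
instance (listt : List Int) (section_size : Int) (current_pos : Int) : Decidable (Pre_reverse_list_section listt section_size current_pos) := by unfold Pre_reverse_list_section; infer_instance

def pvWitness_reverse_list_section : List Int × Int × Int := ([1, 2, 3], 2, 1)

def Spec_reverse_list_section (listt : List Int) (section_size : Int) (current_pos : Int) (out : List Int) : Prop := out = reverse_list_section_alt listt section_size current_pos
instance (listt : List Int) (section_size : Int) (current_pos : Int) (out : List Int) : Decidable (Spec_reverse_list_section listt section_size current_pos out) := by unfold Spec_reverse_list_section; infer_instance

-- ===== CLAIM (what is proved, stated in full; the proofs are below) =====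
def Claim_equal_reverse_list_section : Prop := ∀ (listt : List Int) (section_size : Int) (current_pos : Int), Dom_reverse_list_section listt section_size current_pos → Pre_reverse_list_section listt section_size current_pos → Spec_reverse_list_section listt section_size current_pos (reverse_list_section listt section_size current_pos)

-- ===== LEMMAS AND PROOFS =====

-- the circular index of offset j from current_pos, as a Nat (proof-only abbreviation)
def pvIdx (listt : List Int) (cp : Int) (j : Nat) : Nat :=
  (PySem.Int.mod (cp + (j : Int)) (listt.length : Int)).toNat

-- getD facts about List.set
lemma pv_getD_set_self (l : List Int) (a : Nat) (v : Int) (h : a < l.length) :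
    (l.set a v).getD a 0 = v := by
  simp [List.getD_eq_getElem?_getD, List.getElem?_set_self h]

lemma pv_getD_set_ne (l : List Int) (a q : Nat) (v : Int) (h : q ≠ a) :
    (l.set a v).getD q 0 = l.getD q 0 := by
  simp [List.getD_eq_getElem?_getD, List.getElem?_set_ne (Ne.symm h)]

-- the scatter fold: length, untouched positions, touched positions
lemma pv_length_foldl_set (ps : List (Nat × Int)) (l0 : List Int) :
    (ps.foldl (fun l p => l.set p.1 p.2) l0).length = l0.length := by
  induction ps generalizing l0 with
  | nil => rfl
  | cons p ps ih => simp [List.foldl_cons, ih]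

lemma pv_getD_foldl_set_not_mem (ps : List (Nat × Int)) (l0 : List Int) (q : Nat)
    (h : ∀ p ∈ ps, p.1 ≠ q) :
    (ps.foldl (fun l p => l.set p.1 p.2) l0).getD q 0 = l0.getD q 0 := by
  induction ps generalizing l0 with
  | nil => rfl
  | cons p ps ih =>
    rw [List.foldl_cons, ih _ (fun r hr => h r (List.mem_cons_of_mem _ hr))]
    exact pv_getD_set_ne _ _ _ _ (Ne.symm (h p List.mem_cons_self))

lemma pv_getD_foldl_set_mem (ps : List (Nat × Int)) (l0 : List Int) (j : Nat) (v : Int)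
    (hnd : (ps.map Prod.fst).Nodup) (hmem : (j, v) ∈ ps) (hj : j < l0.length) :
    (ps.foldl (fun l p => l.set p.1 p.2) l0).getD j 0 = v := by
  induction ps generalizing l0 with
  | nil => cases hmem
  | cons p ps ih =>
    simp only [List.map_cons] at hnd
    obtain ⟨hhead, htail⟩ := List.nodup_cons.mp hnd
    rw [List.foldl_cons]
    rcases List.mem_cons.mp hmem with heq | hmem'
    · subst heq
      rw [pv_getD_foldl_set_not_mem]
      · exact pv_getD_set_self _ _ _ hj
      · intro r hr hrq
        refine hhead ?_
        rw [← hrq]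
        exact List.mem_map.mpr ⟨r, hr, rfl⟩
    · exact ih _ htail hmem' (by simpa using hj)

-- invariant of A's inward pairwise-swap loop after i iterations
lemma pv_swap_invariant (orig : List Int) (f : Nat → Nat) (m : Nat)
    (hfn : ∀ j, f j < orig.length)
    (hinj : ∀ j j', j < m → j' < m → f j = f j' → j = j')
    (i : Nat) (hi : i ≤ (m + 1) / 2) :
    (((List.range i).foldl
        (fun l k => (l.set (f k) (l.getD (f (m - 1 - k)) 0)).set (f (m - 1 - k)) (l.getD (f k) 0))
        orig).length = orig.length) ∧
    (∀ j, j < m → (j < i ∨ m - i ≤ j) →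
      ((List.range i).foldl
        (fun l k => (l.set (f k) (l.getD (f (m - 1 - k)) 0)).set (f (m - 1 - k)) (l.getD (f k) 0))
        orig).getD (f j) 0 = orig.getD (f (m - 1 - j)) 0) ∧
    (∀ j, j < m → ¬(j < i ∨ m - i ≤ j) →
      ((List.range i).foldl
        (fun l k => (l.set (f k) (l.getD (f (m - 1 - k)) 0)).set (f (m - 1 - k)) (l.getD (f k) 0))
        orig).getD (f j) 0 = orig.getD (f j) 0) ∧
    (∀ q, (∀ j, j < m → f j ≠ q) →
      ((List.range i).foldl
        (fun l k => (l.set (f k) (l.getD (f (m - 1 - k)) 0)).set (f (m - 1 - k)) (l.getD (f k) 0))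
        orig).getD q 0 = orig.getD q 0) := by
  induction i with
  | zero =>
    refine ⟨rfl, ?_, ?_, ?_⟩
    · intro j hj hcond; omega
    · intro j hj _; rfl
    · intro q _; rfl
  | succ i ih =>
    obtain ⟨hlen, htouch, hmid, hout⟩ := ih (by omega)
    set S : List Int → Nat → List Int :=
      fun l k => (l.set (f k) (l.getD (f (m - 1 - k)) 0)).set (f (m - 1 - k)) (l.getD (f k) 0) with hS
    set L : List Int := (List.range i).foldl S orig with hL
    have hstep : (List.range (i + 1)).foldl S orig = S L i := by
      rw [List.range_succ, List.foldl_append, List.foldl_cons, List.foldl_nil]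
    have hm1 : 2 * i < m := by omega
    have hfiL : f i < L.length := by rw [hlen]; exact hfn i
    have hfbL : f (m - 1 - i) < L.length := by rw [hlen]; exact hfn (m - 1 - i)
    have hri : L.getD (f i) 0 = orig.getD (f i) 0 := hmid i (by omega) (by omega)
    have hrb : L.getD (f (m - 1 - i)) 0 = orig.getD (f (m - 1 - i)) 0 :=
      hmid (m - 1 - i) (by omega) (by omega)
    refine ⟨?_, ?_, ?_, ?_⟩
    · rw [hstep]; simp [hS, hlen]
    · intro j hj hcond
      rw [hstep]
      by_cases hji : j = i
      · subst hji
        by_cases hfib : f j = f (m - 1 - j)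
        · have hjb : j = m - 1 - j := hinj _ _ (by omega) (by omega) hfib
          simp only [hS, ← hfib]
          rw [pv_getD_set_self _ _ _ (by simpa using hfiL), hri]
        · simp only [hS]
          rw [pv_getD_set_ne _ _ _ _ hfib, pv_getD_set_self _ _ _ hfiL, hrb]
      · by_cases hjb : j = m - 1 - i
        · subst hjb
          simp only [hS]
          rw [pv_getD_set_self _ _ _ (by simpa using hfbL), hri]
          have : m - 1 - (m - 1 - i) = i := by omega
          rw [this]
        · have h1 : f j ≠ f i := fun h => hji (hinj _ _ hj (by omega) h)
          have h2 : f j ≠ f (m - 1 - i) := fun h => hjb (hinj _ _ hj (by omega) h)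
          simp only [hS]
          rw [pv_getD_set_ne _ _ _ _ h2, pv_getD_set_ne _ _ _ _ h1]
          exact htouch j hj (by omega)
    · intro j hj hcond
      rw [hstep]
      have hji : j ≠ i := by omega
      have hjb : j ≠ m - 1 - i := by omega
      have h1 : f j ≠ f i := fun h => hji (hinj _ _ hj (by omega) h)
      have h2 : f j ≠ f (m - 1 - i) := fun h => hjb (hinj _ _ hj (by omega) h)
      simp only [hS]
      rw [pv_getD_set_ne _ _ _ _ h2, pv_getD_set_ne _ _ _ _ h1]
      exact hmid j hj (by omega)
    · intro q hq
      rw [hstep]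
      have h1 : f i ≠ q := hq _ (by omega)
      have h2 : f (m - 1 - i) ≠ q := hq _ (by omega)
      simp only [hS]
      rw [pv_getD_set_ne _ _ _ _ (Ne.symm h2), pv_getD_set_ne _ _ _ _ (Ne.symm h1)]
      exact hout q hq

-- the inward-swap loop equals the gather/reverse/scatter fold (abstract form)
lemma pv_swap_eq_scatter (orig : List Int) (f : Nat → Nat) (m : Nat)
    (hfn : ∀ j, f j < orig.length)
    (hinj : ∀ j j', j < m → j' < m → f j = f j' → j = j') :
    (List.range ((m + 1) / 2)).foldl
      (fun l k => (l.set (f k) (l.getD (f (m - 1 - k)) 0)).set (f (m - 1 - k)) (l.getD (f k) 0))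
      orig
    = ((List.range m).map (fun k => (f k, orig.getD (f (m - 1 - k)) 0))).foldl
        (fun l p => l.set p.1 p.2) orig := by
  obtain ⟨hlen, htouch, _, hout⟩ := pv_swap_invariant orig f m hfn hinj ((m + 1) / 2) le_rfl
  have hndk : (((List.range m).map (fun k => (f k, orig.getD (f (m - 1 - k)) 0))).map Prod.fst).Nodup := by
    rw [List.map_map]
    exact List.Nodup.map_on
      (fun x hx y hy h => hinj x y (List.mem_range.mp hx) (List.mem_range.mp hy) h)
      List.nodup_range
  have hlenB := pv_length_foldl_set ((List.range m).map (fun k => (f k, orig.getD (f (m - 1 - k)) 0))) orig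
  apply List.ext_getElem (by rw [hlen, hlenB])
  intro p h1 h2
  rw [← List.getD_eq_getElem _ 0 h1, ← List.getD_eq_getElem _ 0 h2]
  by_cases hex : ∃ j, j < m ∧ f j = p
  · obtain ⟨j, hj, hfj⟩ := hex
    rw [← hfj, htouch j hj (by omega),
        pv_getD_foldl_set_mem _ _ _ _ hndk (List.mem_map_of_mem (List.mem_range.mpr hj)) (hfn j)]
  · simp only [not_exists, not_and] at hex
    rw [hout p (fun j hj => hex j hj), pv_getD_foldl_set_not_mem]
    intro r hr
    obtain ⟨k, hk, rfl⟩ := List.mem_map.mp hr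
    exact hex k (List.mem_range.mp hk)

-- reversing a map over range reads the range backwards
lemma pv_reverse_map_range (g : Nat → Int) (m : Nat) :
    ((List.range m).map g).reverse = (List.range m).map (fun k => g (m - 1 - k)) := by
  apply List.ext_getElem (by simp)
  intro p h1 h2
  have hp : p < m := by simpa using h2
  rw [List.getElem_reverse]
  simp only [List.getElem_map, List.getElem_range, List.length_map, List.length_range]

-- A's port in abstract swap-fold form (section_size > 0, within Pre_)
lemma pv_A_eq (listt : List Int) (s cp : Int) (hs : 0 < s) (hsn : s ≤ (listt.length : Int)) :
    reverse_list_section listt s cp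
    = (List.range ((s.toNat + 1) / 2)).foldl
        (fun l k => (l.set (pvIdx listt cp k) (l.getD (pvIdx listt cp (s.toNat - 1 - k)) 0)).set
          (pvIdx listt cp (s.toNat - 1 - k)) (l.getD (pvIdx listt cp k) 0))
        listt := by
  have hn : (0 : Int) < (listt.length : Int) := by omega
  have hK : PySem.Int.floordiv (s + 1) 2 = (((s.toNat + 1) / 2 : Nat) : Int) := by
    have h1 : s + 1 = ((s.toNat + 1 : Nat) : Int) := by omega
    rw [h1]
    exact_mod_cast PySem.Int.floordiv_natCast (s.toNat + 1) 2
  simp only [reverse_list_section]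
  rw [hK, PySem.List.pyRange_one]
  have hT : ((((s.toNat + 1) / 2 : Nat) : Int) - 0).toNat = (s.toNat + 1) / 2 := by omega
  rw [hT, List.foldl_map]
  apply PySem.List.foldl_congr_mem
  intro l k hk
  have hkm : k < (s.toNat + 1) / 2 := List.mem_range.mp hk
  have hk1 : (k : Int) + 1 ≤ s := by omega
  have hmod1 : PySem.Int.mod (cp + (0 + (k : Int))) (listt.length : Int)
      = ((pvIdx listt cp k : Nat) : Int) := by
    unfold pvIdx
    rw [Int.toNat_of_nonneg (PySem.Int.mod_nonneg _ hn)]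
    norm_num
  have hcast : cp + s - (0 + (k : Int)) - 1 = cp + ((s.toNat - 1 - k : Nat) : Int) := by omega
  have hmod2 : PySem.Int.mod (cp + s - (0 + (k : Int)) - 1) (listt.length : Int)
      = ((pvIdx listt cp (s.toNat - 1 - k) : Nat) : Int) := by
    unfold pvIdx
    rw [Int.toNat_of_nonneg (PySem.Int.mod_nonneg _ hn), hcast]
  rw [hmod1, hmod2]
  simp only [PySem.List.pyGetD_natCast, PySem.List.pySetD_natCast]

-- B's port in abstract scatter form (section_size > 0, within Pre_)
lemma pv_B_eq (listt : List Int) (s cp : Int) (hs : 0 < s) (hsn : s ≤ (listt.length : Int)) :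
    reverse_list_section_alt listt s cp
    = ((List.range s.toNat).map
        (fun k => (pvIdx listt cp k, listt.getD (pvIdx listt cp (s.toNat - 1 - k)) 0))).foldl
        (fun l p => l.set p.1 p.2) listt := by
  have hn : (0 : Int) < (listt.length : Int) := by omega
  simp only [reverse_list_section_alt]
  rw [PySem.List.pyRange_one]
  have hT : (s - 0).toNat = s.toNat := by omega
  rw [hT, List.map_map]
  have hidx : ((fun i => PySem.Int.mod (cp + i) (listt.length : Int)) ∘ fun (k : Nat) => 0 + (k : Int))
      = fun (k : Nat) => ((pvIdx listt cp k : Nat) : Int) := by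
    funext k
    simp only [Function.comp]
    unfold pvIdx
    rw [Int.toNat_of_nonneg (PySem.Int.mod_nonneg _ hn)]
    norm_num
  rw [hidx, List.map_map]
  have hvals : ((fun j => PySem.List.pyGetD listt j 0) ∘ fun (k : Nat) => ((pvIdx listt cp k : Nat) : Int))
      = fun (k : Nat) => listt.getD (pvIdx listt cp k) 0 := by
    funext k
    simp [Function.comp, PySem.List.pyGetD_natCast]
  rw [hvals, pv_reverse_map_range, List.zip_map', List.foldl_map, List.foldl_map]
  apply PySem.List.foldl_congr_mem
  intro l k _
  simp only [PySem.List.pySetD_natCast]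

-- both ports return the input unchanged when section_size ≤ 0
lemma pv_A_nil (listt : List Int) (s cp : Int) (hs : s ≤ 0) :
    reverse_list_section listt s cp = listt := by
  have hK : PySem.Int.floordiv (s + 1) 2 ≤ 0 := by
    have := (PySem.Int.floordiv_lt_iff_lt_mul (a := s + 1) (q := 1) (by norm_num : (0:Int) < 2)).mpr (by omega)
    omega
  simp only [reverse_list_section]
  rw [PySem.List.pyRange_one_eq_nil hK, List.foldl_nil]

lemma pv_B_nil (listt : List Int) (s cp : Int) (hs : s ≤ 0) :
    reverse_list_section_alt listt s cp = listt := by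
  simp only [reverse_list_section_alt]
  rw [PySem.List.pyRange_one_eq_nil hs]
  simp

-- ===== VERDICT (by name: the statement is the Claim_ definition above) =====
theorem reverse_list_section_spec : Claim_equal_reverse_list_section := by
  intro listt s cp _ hpre
  unfold Spec_reverse_list_section
  rcases le_or_gt s 0 with hs | hs
  · rw [pv_A_nil listt s cp hs, pv_B_nil listt s cp hs]
  · have hpre' : s ≤ (listt.length : Int) := hpre
    have hn : (0 : Int) < (listt.length : Int) := by omega
    have hfn : ∀ j, pvIdx listt cp j < listt.length := by
      intro j
      have h1 := PySem.Int.mod_nonneg (cp + (j : Int)) hn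
      have h2 := PySem.Int.mod_lt (cp + (j : Int)) hn
      unfold pvIdx
      omega
    have hinj : ∀ j j', j < s.toNat → j' < s.toNat → pvIdx listt cp j = pvIdx listt cp j' → j = j' := by
      intro j j' hj hj' heq
      have h1 := PySem.Int.mod_nonneg (cp + (j : Int)) hn
      have h1' := PySem.Int.mod_nonneg (cp + (j' : Int)) hn
      have hmeq : PySem.Int.mod (cp + (j : Int)) (listt.length : Int)
          = PySem.Int.mod (cp + (j' : Int)) (listt.length : Int) := by
        unfold pvIdx at heq
        omega
      have e1 := PySem.Int.floordiv_mul_add_mod (cp + (j : Int)) (listt.length : Int)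
      have e2 := PySem.Int.floordiv_mul_add_mod (cp + (j' : Int)) (listt.length : Int)
      set q1 := PySem.Int.floordiv (cp + (j : Int)) (listt.length : Int) with hq1
      set q2 := PySem.Int.floordiv (cp + (j' : Int)) (listt.length : Int) with hq2
      have key : (q1 - q2) * (listt.length : Int) = (j : Int) - (j' : Int) := by
        rw [sub_mul]; linarith [e1, e2, hmeq]
      rcases lt_trichotomy (q1 - q2) 0 with hq | hq | hq
      · have hle : q1 - q2 ≤ -1 := by omega
        have := mul_le_mul_of_nonneg_right hle (le_of_lt hn)
        rw [key] at this
        omega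
      · rw [hq, zero_mul] at key; omega
      · have hge : 1 ≤ q1 - q2 := by omega
        have := mul_le_mul_of_nonneg_right hge (le_of_lt hn)
        rw [key] at this
        omega
    rw [pv_A_eq listt s cp hs hpre', pv_B_eq listt s cp hs hpre']
    exact pv_swap_eq_scatter listt (pvIdx listt cp) s.toNat hfn hinj
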